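-- pv_equiv track=rewrite | github.com/antenore/voynich-toolkit | src/voynich_toolkit/phrase_completion.py | classify_corpus
-- ===== SOURCE A (Python) =====
-- def classify_corpus(word_freqs, lexicon_set, form_to_gloss):
--     """Split decoded words into glossed / attested / unknown.
--
--     Returns three dicts {word: freq}.
--     """
--     glossed = {}
--     attested = {}
--     unknown = {}
--
--     for word, freq in word_freqs.items():
--         if word in form_to_gloss:
--             glossed[word] = freq
--         elif word in lexicon_set:
--             attested[word] = freq
--         else:
--             unknown[word] = freq
--
--     return glossed, attested, unknown
-- ===== SOURCE B (Python) =====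
-- def classify_corpus(word_freqs, lexicon_set, form_to_gloss):
--     """Split decoded words into glossed / attested / unknown via set algebra.
--
--     Returns three dicts {word: freq}.
--     """
--     glossed_keys = word_freqs.keys() & form_to_gloss.keys()
--     attested_keys = (word_freqs.keys() & set(lexicon_set)) - form_to_gloss.keys()
--     glossed = {w: f for w, f in word_freqs.items() if w in glossed_keys}
--     attested = {w: f for w, f in word_freqs.items() if w in attested_keys}
--     unknown = {w: f for w, f in word_freqs.items()
--                if w not in glossed_keys and w not in attested_keys}
--     return glossed, attested, unknown
-- ===== Notes on version B (the rewrite author's own statement) =====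
-- stated objective: idiomatic
-- what changed: Replaces the branching classification loop by set algebra on the key views (intersection/difference computes the three key partitions up front) followed by three dict comprehensions over word_freqs.
import Mathlib
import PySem

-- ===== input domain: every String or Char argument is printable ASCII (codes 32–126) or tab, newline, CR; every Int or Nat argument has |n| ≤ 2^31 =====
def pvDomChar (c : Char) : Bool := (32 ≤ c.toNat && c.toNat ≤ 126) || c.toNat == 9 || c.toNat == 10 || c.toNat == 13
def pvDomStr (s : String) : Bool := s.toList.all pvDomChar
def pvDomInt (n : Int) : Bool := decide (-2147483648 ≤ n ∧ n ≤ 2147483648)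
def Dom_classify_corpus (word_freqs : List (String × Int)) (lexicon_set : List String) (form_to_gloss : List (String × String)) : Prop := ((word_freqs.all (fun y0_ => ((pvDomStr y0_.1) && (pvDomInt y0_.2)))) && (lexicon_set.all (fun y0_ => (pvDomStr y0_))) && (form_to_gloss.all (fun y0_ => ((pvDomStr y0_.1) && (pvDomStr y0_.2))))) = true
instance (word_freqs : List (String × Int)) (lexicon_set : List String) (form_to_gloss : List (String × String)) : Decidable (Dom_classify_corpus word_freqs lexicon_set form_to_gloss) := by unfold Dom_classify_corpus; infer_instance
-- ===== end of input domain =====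

-- B replaces A's branching loop by set algebra on the key views plus dict comprehensions (idiomatic; same cost).

-- ===== PORT A =====
-- the loop body: one 'for word, freq in word_freqs.items()' step updating the three dicts
def pvStepA (lexicon_set : List String) (form_to_gloss : List (String × String))
    (st : PySem.Dict String Int × PySem.Dict String Int × PySem.Dict String Int)
    (p : String × Int) :
    PySem.Dict String Int × PySem.Dict String Int × PySem.Dict String Int :=
  if (PySem.Dict.mk form_to_gloss).contains p.1 then (st.1.insert p.1 p.2, st.2.1, st.2.2)
  else if PySem.Set.contains lexicon_set p.1 then (st.1, st.2.1.insert p.1 p.2, st.2.2)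
  else (st.1, st.2.1, st.2.2.insert p.1 p.2)

def classify_corpus (word_freqs : List (String × Int)) (lexicon_set : List String) (form_to_gloss : List (String × String)) : (List (String × Int)) × (List (String × Int)) × (List (String × Int)) :=
  let r := word_freqs.foldl (pvStepA lexicon_set form_to_gloss)
    (PySem.Dict.empty, PySem.Dict.empty, PySem.Dict.empty)
  (r.1.items, r.2.1.items, r.2.2.items)

-- ===== PORT B =====
-- {w: f for w, f in word_freqs.items() if p w}  (a dict comprehension, returned as its items)
def pvDictComp (word_freqs : List (String × Int)) (p : String → Bool) : List (String × Int) :=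
  ((word_freqs.filter (fun q => p q.1)).foldl
    (fun d q => d.insert q.1 q.2) (PySem.Dict.empty : PySem.Dict String Int)).items

def classify_corpus_alt (word_freqs : List (String × Int)) (lexicon_set : List String) (form_to_gloss : List (String × String)) : (List (String × Int)) × (List (String × Int)) × (List (String × Int)) :=
  let glossed_keys : PySem.Set String :=
    PySem.Set.inter (PySem.Set.ofList (word_freqs.map Prod.fst)) (PySem.Set.ofList (form_to_gloss.map Prod.fst))
  let attested_keys : PySem.Set String :=
    PySem.Set.diff (PySem.Set.inter (PySem.Set.ofList (word_freqs.map Prod.fst)) (PySem.Set.ofList lexicon_set))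
      (PySem.Set.ofList (form_to_gloss.map Prod.fst))
  (pvDictComp word_freqs (fun w => PySem.Set.contains glossed_keys w),
   pvDictComp word_freqs (fun w => PySem.Set.contains attested_keys w),
   pvDictComp word_freqs (fun w => !PySem.Set.contains glossed_keys w && !PySem.Set.contains attested_keys w))

-- ===== PRECONDITION & SPEC =====
def Spec_classify_corpus (word_freqs : List (String × Int)) (lexicon_set : List String) (form_to_gloss : List (String × String)) (out : (List (String × Int)) × (List (String × Int)) × (List (String × Int))) : Prop := out = classify_corpus_alt word_freqs lexicon_set form_to_gloss
instance (word_freqs : List (String × Int)) (lexicon_set : List String) (form_to_gloss : List (String × String)) (out : (List (String × Int)) × (List (String × Int)) × (List (String × Int))) : Decidable (Spec_classify_corpus word_freqs lexicon_set form_to_gloss out) := by unfold Spec_classify_corpus; infer_instance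

-- ===== CLAIM (what is proved, stated in full; the proofs are below) =====
def Claim_equal_classify_corpus : Prop := ∀ (word_freqs : List (String × Int)) (lexicon_set : List String) (form_to_gloss : List (String × String)), Dom_classify_corpus word_freqs lexicon_set form_to_gloss → Spec_classify_corpus word_freqs lexicon_set form_to_gloss (classify_corpus word_freqs lexicon_set form_to_gloss)

-- ===== LEMMAS AND PROOFS =====

def pvIns (d : PySem.Dict String Int) (q : String × Int) : PySem.Dict String Int := d.insert q.1 q.2

-- A's single fold over the triple equals three independent filtered folds
lemma pv_split (lex : List String) (f2g : List (String × String)) :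
    ∀ (wf : List (String × Int)) (g a u : PySem.Dict String Int),
    wf.foldl (pvStepA lex f2g) (g, a, u) =
      ((wf.filter (fun q => (PySem.Dict.mk f2g).contains q.1)).foldl pvIns g,
       (wf.filter (fun q => !(PySem.Dict.mk f2g).contains q.1 && PySem.Set.contains lex q.1)).foldl pvIns a,
       (wf.filter (fun q => !(PySem.Dict.mk f2g).contains q.1 && !PySem.Set.contains lex q.1)).foldl pvIns u) := by
  intro wf
  induction wf with
  | nil => intro g a u; rfl
  | cons q rest ih =>
    intro g a u
    cases h1 : f2g.any (fun p => p.1 == q.1) <;>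
      by_cases h2 : q.1 ∈ lex <;>
        simp [pvStepA, pvIns, h1, h2, ih]

-- B's glossed-key test agrees with A's 'word in form_to_gloss' on keys of word_freqs
lemma pv_gk (wf : List (String × Int)) (f2g : List (String × String)) (w : String)
    (hw : w ∈ wf.map Prod.fst) :
    PySem.Set.contains
      (PySem.Set.inter (PySem.Set.ofList (wf.map Prod.fst)) (PySem.Set.ofList (f2g.map Prod.fst))) w
    = (PySem.Dict.mk f2g).contains w := by
  rw [Bool.eq_iff_iff]
  simp [PySem.Set.mem_inter, PySem.Set.mem_ofList, hw]

-- B's attested-key test agrees with A's second branch condition on keys of word_freqs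
lemma pv_ak (wf : List (String × Int)) (lex : List String) (f2g : List (String × String)) (w : String)
    (hw : w ∈ wf.map Prod.fst) :
    PySem.Set.contains
      (PySem.Set.diff (PySem.Set.inter (PySem.Set.ofList (wf.map Prod.fst)) (PySem.Set.ofList lex))
        (PySem.Set.ofList (f2g.map Prod.fst))) w
    = (!(PySem.Dict.mk f2g).contains w && PySem.Set.contains lex w) := by
  rw [Bool.eq_iff_iff]
  simp [PySem.Set.mem_diff, PySem.Set.mem_inter, PySem.Set.mem_ofList, hw]
  aesop

-- ===== VERDICT (by name: the statement is the Claim_ definition above) =====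
theorem classify_corpus_spec : Claim_equal_classify_corpus := by
  intro wf lex f2g _
  unfold Spec_classify_corpus classify_corpus classify_corpus_alt pvDictComp
  have hg : wf.filter (fun q => PySem.Set.contains
        (PySem.Set.inter (PySem.Set.ofList (wf.map Prod.fst)) (PySem.Set.ofList (f2g.map Prod.fst))) q.1)
      = wf.filter (fun q => (PySem.Dict.mk f2g).contains q.1) :=
    List.filter_congr (fun q hq => pv_gk wf f2g q.1 (List.mem_map_of_mem hq))
  have ha : wf.filter (fun q => PySem.Set.contains
        (PySem.Set.diff (PySem.Set.inter (PySem.Set.ofList (wf.map Prod.fst)) (PySem.Set.ofList lex))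
          (PySem.Set.ofList (f2g.map Prod.fst))) q.1)
      = wf.filter (fun q => !(PySem.Dict.mk f2g).contains q.1 && PySem.Set.contains lex q.1) :=
    List.filter_congr (fun q hq => pv_ak wf lex f2g q.1 (List.mem_map_of_mem hq))
  have hu : wf.filter (fun q =>
        (!PySem.Set.contains
          (PySem.Set.inter (PySem.Set.ofList (wf.map Prod.fst)) (PySem.Set.ofList (f2g.map Prod.fst))) q.1 &&
         !PySem.Set.contains
          (PySem.Set.diff (PySem.Set.inter (PySem.Set.ofList (wf.map Prod.fst)) (PySem.Set.ofList lex))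
            (PySem.Set.ofList (f2g.map Prod.fst))) q.1))
      = wf.filter (fun q => !(PySem.Dict.mk f2g).contains q.1 && !PySem.Set.contains lex q.1) :=
    List.filter_congr (fun q hq => by
      rw [pv_gk wf f2g q.1 (List.mem_map_of_mem hq), pv_ak wf lex f2g q.1 (List.mem_map_of_mem hq)]
      cases h1 : (PySem.Dict.mk f2g).contains q.1 <;>
        cases h2 : PySem.Set.contains lex q.1 <;> rfl)
  simp only [hg, ha, hu, pv_split lex f2g wf]
  rfl
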